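-- pv_equiv track=rewrite | github.com/Apollonaut13/AdventOfCode2024 | day7_recursion.py | do_math
-- ===== SOURCE A (Python) =====
-- def do_math(numbers, operators):
--     result = []
--     if len(numbers) <= 1:
--         return numbers
--
--     head, tail = numbers[-1], numbers[:-1]
--
--     tail = do_math(tail, operators)
--     for n in tail:
--         for op in operators:
--             if op == '+':
--                 result.append(n + head)
--             if op == '*':
--                 result.append(n * head)
--             if op == '||':
--                 result.append(int(f"{n}{head}"))
--     return result
-- ===== SOURCE B (Python) =====
-- def _apply(n, head, op):
--     if op == '+':
--         return n + head
--     if op == '*':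
--         return n * head
--     return int(f"{n}{head}")
--
--
-- def do_math(numbers, operators):
--     if len(numbers) <= 1:
--         return numbers
--     ops = [op for op in operators if op in ('+', '*', '||')]
--     results = [numbers[0]]
--     for head in numbers[1:]:
--         results = [_apply(n, head, op) for n in results for op in ops]
--     return results
-- ===== Notes on version B (the rewrite author's own statement) =====
-- stated objective: alternative
-- what changed: Replaces the right-peeling recursion (numbers[-1] / numbers[:-1]) by a single left-to-right loop that folds each subsequent number into the running result list via a flat comprehension over the once-pre-filtered operator list.
import Mathlib
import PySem

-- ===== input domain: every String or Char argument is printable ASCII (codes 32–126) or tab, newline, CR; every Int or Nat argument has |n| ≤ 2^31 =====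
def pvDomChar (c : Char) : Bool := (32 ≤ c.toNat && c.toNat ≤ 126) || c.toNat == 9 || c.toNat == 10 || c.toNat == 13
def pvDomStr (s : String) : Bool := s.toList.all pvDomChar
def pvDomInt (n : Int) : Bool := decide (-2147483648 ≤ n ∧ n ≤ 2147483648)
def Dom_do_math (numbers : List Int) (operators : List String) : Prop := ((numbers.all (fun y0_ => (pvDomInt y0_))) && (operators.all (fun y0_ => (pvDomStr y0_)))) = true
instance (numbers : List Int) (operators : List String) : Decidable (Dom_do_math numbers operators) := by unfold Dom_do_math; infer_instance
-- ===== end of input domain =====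

-- B replaces A's right-peeling recursion by one left-to-right fold with a pre-filtered
-- operator list (objective: alternative decomposition, same output in the same order).


-- ===== PORT A =====
-- int(f"{n}{head}") is PySem.Int.ofStr? on the concatenated str()s; the '.getD 0' stands for
-- the ValueError case, which Pre_do_math excludes.
def do_math (numbers : List Int) (operators : List String) : List Int :=
  if numbers.length ≤ 1 then numbers
  else
    let head := (PySem.List.pyGet? numbers (-1)).getD 0
    let tail := PySem.List.slice numbers none (some (-1))
    let tailR := do_math tail operators
    tailR.foldl (fun result n =>
      operators.foldl (fun result op =>
        let result := if op == "+" then result ++ [n + head] else result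
        let result := if op == "*" then result ++ [n * head] else result
        if op == "||" then
          result ++ [(PySem.Int.ofStr? (PySem.Int.toStr n ++ PySem.Int.toStr head)).getD 0]
        else result) result) []
termination_by numbers.length
decreasing_by
  simp only [PySem.List.slice_to_neg_one, List.length_dropLast]; omega

-- ===== PORT B =====
-- helper _apply of Source B
def pvApply (n head : Int) (op : String) : Int :=
  if op == "+" then n + head
  else if op == "*" then n * head
  else (PySem.Int.ofStr? (PySem.Int.toStr n ++ PySem.Int.toStr head)).getD 0

def do_math_alt (numbers : List Int) (operators : List String) : List Int :=
  if numbers.length ≤ 1 then numbers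
  else
    let ops := operators.filter (fun op => op == "+" || op == "*" || op == "||")
    match numbers with
    | [] => []
    | n0 :: rest =>
      rest.foldl (fun results head => results.flatMap (fun n => ops.map (pvApply n head))) [n0]

-- ===== PRECONDITION & SPEC =====
-- Pre_ excludes exactly the inputs where Python A raises ValueError: with '||' among the
-- operators and a negative number after the first, int(f"{n}{head}") sees '-' mid-string.
def Pre_do_math (numbers : List Int) (operators : List String) : Prop :=
  "||" ∈ operators → ∀ x ∈ numbers.drop 1, 0 ≤ x
instance (numbers : List Int) (operators : List String) : Decidable (Pre_do_math numbers operators) := by unfold Pre_do_math; infer_instance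
def pvWitness_do_math : List Int × List String := ([1, 2, 3], ["+", "*", "||"])

def Spec_do_math (numbers : List Int) (operators : List String) (out : List Int) : Prop := out = do_math_alt numbers operators
instance (numbers : List Int) (operators : List String) (out : List Int) : Decidable (Spec_do_math numbers operators out) := by unfold Spec_do_math; infer_instance

-- ===== CLAIM (what is proved, stated in full; the proofs are below) =====
def Claim_equal_do_math : Prop := ∀ (numbers : List Int) (operators : List String), Dom_do_math numbers operators → Pre_do_math numbers operators → Spec_do_math numbers operators (do_math numbers operators)

-- ===== LEMMAS AND PROOFS =====

-- A's inner operator loop appends exactly the pvApply images of the kept operators.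
theorem inner_loop_eq (operators : List String) (n head : Int) (res : List Int) :
    operators.foldl (fun result op =>
        let result := if op == "+" then result ++ [n + head] else result
        let result := if op == "*" then result ++ [n * head] else result
        if op == "||" then
          result ++ [(PySem.Int.ofStr? (PySem.Int.toStr n ++ PySem.Int.toStr head)).getD 0]
        else result) res
      = res ++ (operators.filter (fun op => op == "+" || op == "*" || op == "||")).map
          (pvApply n head) := by
  induction operators generalizing res with
  | nil => simp
  | cons op ops ih =>
    simp only [List.foldl_cons, List.filter_cons, ih]
    by_cases h1 : op = "+"
    · subst h1; simp [pvApply]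
    · by_cases h2 : op = "*"
      · subst h2; simp [pvApply]
      · by_cases h3 : op = "||"
        · subst h3; simp [pvApply]
        · simp [h1, h2, h3]

-- A's outer loop over the recursive result is a flatMap of the per-element contributions.
theorem outer_loop_eq (operators : List String) (head : Int) (tailR : List Int) :
    tailR.foldl (fun result n =>
        operators.foldl (fun result op =>
          let result := if op == "+" then result ++ [n + head] else result
          let result := if op == "*" then result ++ [n * head] else result
          if op == "||" then
            result ++ [(PySem.Int.ofStr? (PySem.Int.toStr n ++ PySem.Int.toStr head)).getD 0]
          else result) result) []
      = tailR.flatMap (fun n =>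
          ((operators.filter (fun op => op == "+" || op == "*" || op == "||")).map
            (pvApply n head))) := by
  have : ∀ (l : List Int) (acc : List Int),
      l.foldl (fun result n =>
        operators.foldl (fun result op =>
          let result := if op == "+" then result ++ [n + head] else result
          let result := if op == "*" then result ++ [n * head] else result
          if op == "||" then
            result ++ [(PySem.Int.ofStr? (PySem.Int.toStr n ++ PySem.Int.toStr head)).getD 0]
          else result) result) acc
      = acc ++ l.flatMap (fun n =>
          ((operators.filter (fun op => op == "+" || op == "*" || op == "||")).map
            (pvApply n head))) := by
    intro l
    induction l with
    | nil => simp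
    | cons n ns ih =>
      intro acc
      rw [List.foldl_cons, inner_loop_eq, ih, List.append_assoc, List.flatMap_cons]
  simpa using this tailR []

-- A on h0 :: t equals B's left fold started at [h0].
theorem do_math_cons (operators : List String) (t : List Int) (h0 : Int) :
    do_math (h0 :: t) operators
      = t.foldl (fun results head => results.flatMap (fun n =>
          ((operators.filter (fun op => op == "+" || op == "*" || op == "||")).map
            (pvApply n head)))) [h0] := by
  induction t using List.reverseRecOn with
  | nil => simp [do_math]
  | append_singleton t' x ih =>
    rw [do_math]
    have hlen : ¬ (h0 :: (t' ++ [x])).length ≤ 1 := by simp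
    simp only [hlen, if_false]
    have hcons : h0 :: (t' ++ [x]) = (h0 :: t') ++ [x] := by simp
    have hhead : (PySem.List.pyGet? (h0 :: (t' ++ [x])) (-1)).getD 0 = x := by
      rw [PySem.List.pyGet?_neg_one, hcons, List.getLast?_concat]; rfl
    have htail : PySem.List.slice (h0 :: (t' ++ [x])) none (some (-1)) = h0 :: t' := by
      rw [PySem.List.slice_to_neg_one, hcons, List.dropLast_concat]
    rw [hhead, htail, ih, outer_loop_eq, List.foldl_append]
    simp

theorem do_math_eq_alt (numbers : List Int) (operators : List String) :
    do_math numbers operators = do_math_alt numbers operators := by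
  match numbers with
  | [] => rw [do_math]; rfl
  | [a] => rw [do_math]; rfl
  | a :: b :: rest =>
    rw [do_math_cons, do_math_alt]
    simp

-- ===== VERDICT (by name: the statement is the Claim_ definition above) =====
theorem do_math_spec : Claim_equal_do_math := by
  intro numbers operators _ _
  exact do_math_eq_alt numbers operators
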